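-- pv_equiv track=rewrite | github.com/AntoniyaV/SoftUni-Exercises | Fundamentals/08. Text Processing/10. Winning Ticket.py | ticket_checker
-- ===== SOURCE A (Python) =====
-- def ticket_checker(some_ticket, some_symbol):
--     counter = 0
--     for el in some_ticket:
--         if el == some_symbol:
--             counter += 1
--         else:
--             if counter >= 6:
--                 break
--             else:
--                 counter = 0
--     return counter
-- ===== SOURCE B (Python) =====
-- def ticket_checker(some_ticket, some_symbol):
--     # Run-wise pass: advance over maximal runs of equal characters;
--     # return the first symbol-run of length >= 6, else the trailing symbol-run length (0 if none).
--     last = 0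
--     i = 0
--     n = len(some_ticket)
--     while i < n:
--         ch = some_ticket[i]
--         j = i + 1
--         while j < n and some_ticket[j] == ch:
--             j += 1
--         if ch == some_symbol:
--             if j - i >= 6:
--                 return j - i
--             last = j - i
--         else:
--             last = 0
--         i = j
--     return last
-- ===== Notes on version B (the rewrite author's own statement) =====
-- stated objective: alternative
-- what changed: Replaces A's element-wise running counter with break/reset bookkeeping by a run-wise pass that peels maximal runs of equal characters off the front, returning the first symbol run of length >= 6 or else the trailing symbol-run length.
import Mathlib
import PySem

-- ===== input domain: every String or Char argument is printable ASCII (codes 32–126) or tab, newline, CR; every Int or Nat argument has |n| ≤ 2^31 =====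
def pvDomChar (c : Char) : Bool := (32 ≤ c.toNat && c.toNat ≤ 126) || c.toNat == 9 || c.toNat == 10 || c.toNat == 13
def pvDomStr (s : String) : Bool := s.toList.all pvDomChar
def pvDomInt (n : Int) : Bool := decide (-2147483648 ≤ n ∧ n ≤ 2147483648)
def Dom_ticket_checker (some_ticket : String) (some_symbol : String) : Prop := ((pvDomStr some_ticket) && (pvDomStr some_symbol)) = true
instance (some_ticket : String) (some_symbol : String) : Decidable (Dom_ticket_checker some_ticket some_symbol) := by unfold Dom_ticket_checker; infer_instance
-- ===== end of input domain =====

-- B replaces A's element-wise running counter (with its break/reset bookkeeping) by a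
-- run-wise pass over maximal runs of equal characters; same return value, same cost class.

-- ===== PORT A =====
-- the for-loop of A: state = counter; 'break' returns the counter
def tcLoopA (sym : String) : List Char → Int → Int
  | [], counter => counter
  | el :: rest, counter =>
    if String.ofList [el] = sym then tcLoopA sym rest (counter + 1)
    else if counter ≥ 6 then counter
    else tcLoopA sym rest 0

def ticket_checker (some_ticket : String) (some_symbol : String) : Int :=
  tcLoopA some_symbol some_ticket.toList 0

-- ===== PORT B =====
-- Source B's outer while-loop: peel one maximal run off the front each iteration; state = last
def tcLoopB (sym : String) : List Char → Int → Int
  | [], last => last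
  | ch :: rest, last =>
    let len : Int := 1 + (rest.takeWhile (· == ch)).length
    let rest' := rest.dropWhile (· == ch)
    if String.ofList [ch] = sym then
      (if len ≥ 6 then len else tcLoopB sym rest' len)
    else
      tcLoopB sym rest' 0
  termination_by l _ => l.length
  decreasing_by
    · simpa using Nat.lt_succ_of_le (List.length_dropWhile_le _ _)
    · simpa using Nat.lt_succ_of_le (List.length_dropWhile_le _ _)

def ticket_checker_alt (some_ticket : String) (some_symbol : String) : Int :=
  tcLoopB some_symbol some_ticket.toList 0

-- ===== PRECONDITION & SPEC =====
def Spec_ticket_checker (some_ticket : String) (some_symbol : String) (out : Int) : Prop := out = ticket_checker_alt some_ticket some_symbol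
instance (some_ticket : String) (some_symbol : String) (out : Int) : Decidable (Spec_ticket_checker some_ticket some_symbol out) := by unfold Spec_ticket_checker; infer_instance

-- ===== CLAIM (what is proved, stated in full; the proofs are below) =====
def Claim_equal_ticket_checker : Prop := ∀ (some_ticket : String) (some_symbol : String), Dom_ticket_checker some_ticket some_symbol → Spec_ticket_checker some_ticket some_symbol (ticket_checker some_ticket some_symbol)

-- ===== LEMMAS AND PROOFS =====

-- A skips a block of non-matching characters with counter 0
theorem tcLoopA_skip (sym : String) (l rest : List Char)
    (h : ∀ x ∈ l, String.ofList [x] ≠ sym) :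
    tcLoopA sym (l ++ rest) 0 = tcLoopA sym rest 0 := by
  induction l with
  | nil => simp
  | cons a t ih =>
    have ha := h a (by simp)
    simp only [List.cons_append, tcLoopA, if_neg ha]
    norm_num
    exact ih (fun x hx => h x (by simp [hx]))

-- A accumulates through a block of matching characters
theorem tcLoopA_run (sym : String) (l : List Char)
    (h : ∀ x ∈ l, String.ofList [x] = sym) :
    ∀ rest c, tcLoopA sym (l ++ rest) c = tcLoopA sym rest (c + l.length) := by
  induction l with
  | nil => simp
  | cons a t ih =>
    intro rest c
    have ha := h a (by simp)
    simp only [List.cons_append, tcLoopA, if_pos ha]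
    rw [ih (fun x hx => h x (by simp [hx]))]
    congr 1
    simp only [List.length_cons]
    push_cast
    ring

theorem head_dropWhile_false {α : Type} (p : α → Bool) :
    ∀ (l : List α) (a : α) (t : List α), l.dropWhile p = a :: t → p a = false := by
  intro l
  induction l with
  | nil => intro a t h; simp [List.dropWhile] at h
  | cons b bt ih =>
    intro a t h
    by_cases hb : p b = true
    · rw [List.dropWhile_cons_of_pos hb] at h
      exact ih a t h
    · rw [List.dropWhile_cons_of_neg hb] at h
      cases h
      simpa using hb

theorem singleton_inj {a b : Char} (h : String.ofList [a] = String.ofList [b]) : a = b := by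
  have h2 : ([a] : List Char) = [b] := by simpa using congrArg String.toList h
  simpa using h2

theorem main_aux (sym : String) : ∀ (n : Nat) (l : List Char), l.length ≤ n → tcLoopA sym l 0 = tcLoopB sym l 0 := by
  intro n
  induction n with
  | zero =>
    intro l hl
    have : l = [] := List.length_eq_zero_iff.mp (Nat.le_zero.mp hl)
    simp [this, tcLoopA, tcLoopB]
  | succ n ih =>
    intro l hl
    match l with
    | [] => simp [tcLoopA, tcLoopB]
    | ch :: rest =>
      have hrest : rest.length ≤ n := by simpa using hl
      set tw := rest.takeWhile (· == ch) with htw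
      set dw := rest.dropWhile (· == ch) with hdw
      have hsplit : rest = tw ++ dw := (List.takeWhile_append_dropWhile).symm
      have htw_all : ∀ x ∈ tw, x = ch := by
        intro x hx
        have := List.mem_takeWhile_imp (htw ▸ hx)
        simpa using this
      have hdwlen : dw.length ≤ rest.length := List.length_dropWhile_le _ _
      by_cases hch : String.ofList [ch] = sym
      · -- matching run
        have hall : ∀ x ∈ tw, String.ofList [x] = sym := fun x hx => (htw_all x hx) ▸ hch
        have hA : tcLoopA sym (ch :: rest) 0 = tcLoopA sym dw (1 + tw.length) := by
          simp only [tcLoopA, if_pos hch]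
          norm_num
          conv_lhs => rw [hsplit]
          rw [tcLoopA_run sym tw hall dw 1]
        have hB : tcLoopB sym (ch :: rest) 0
            = (if (1 + (tw.length : Int)) ≥ 6 then (1 + (tw.length : Int))
               else tcLoopB sym dw (1 + tw.length)) := by
          rw [tcLoopB]
          simp only [← htw, ← hdw, if_pos hch]
        rw [hA, hB]
        by_cases hbig : (1 + (tw.length : Int)) ≥ 6
        · rw [if_pos hbig]
          match hdwe : dw with
          | [] => simp [tcLoopA]
          | d :: dt =>
            have hd : String.ofList [d] ≠ sym := by
              intro hds
              have hf : (d == ch) = false := head_dropWhile_false _ rest d dt hdw.symm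
              have : d ≠ ch := by simpa using hf
              exact this (singleton_inj (hds.trans hch.symm))
            simp [tcLoopA, hd, hbig]
        · rw [if_neg hbig]
          match hdwe : dw with
          | [] => simp [tcLoopA, tcLoopB]
          | d :: dt =>
            have hdch : d ≠ ch := by
              have hf : (d == ch) = false := head_dropWhile_false _ rest d dt hdw.symm
              simpa using hf
            have hd : String.ofList [d] ≠ sym := fun hds => hdch (singleton_inj (hds.trans hch.symm))
            -- A steps over d's run with counter reset to 0; B's next iteration does the same
            have hA2 : tcLoopA sym (d :: dt) (1 + (tw.length : Int)) = tcLoopA sym dt 0 := by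
              simp only [tcLoopA, if_neg hd]
              rw [if_neg hbig]
            have hB2 : tcLoopB sym (d :: dt) (1 + (tw.length : Int))
                = tcLoopB sym (dt.dropWhile (· == d)) 0 := by
              rw [tcLoopB]
              simp [hd]
            have hdt_all : ∀ x ∈ dt.takeWhile (· == d), String.ofList [x] ≠ sym := by
              intro x hx
              have hxd : x = d := by simpa using List.mem_takeWhile_imp hx
              exact hxd ▸ hd
            have hA3 : tcLoopA sym dt 0 = tcLoopA sym (dt.dropWhile (· == d)) 0 := by
              conv_lhs => rw [(List.takeWhile_append_dropWhile (p := (· == d)) (l := dt)).symm]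
              exact tcLoopA_skip sym _ _ hdt_all
            rw [hA2, hB2, hA3]
            apply ih
            have h1 : (dt.dropWhile (· == d)).length ≤ dt.length := List.length_dropWhile_le _ _
            have h2 := hdwlen
            simp at h2; omega
      · -- non-matching run
        have hall : ∀ x ∈ tw, String.ofList [x] ≠ sym := fun x hx => (htw_all x hx) ▸ hch
        have hA : tcLoopA sym (ch :: rest) 0 = tcLoopA sym dw 0 := by
          simp only [tcLoopA, if_neg hch]
          norm_num
          conv_lhs => rw [hsplit]
          exact tcLoopA_skip sym tw dw hall
        have hB : tcLoopB sym (ch :: rest) 0 = tcLoopB sym dw 0 := by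
          rw [tcLoopB]
          simp only [← hdw]
          simp [hch]
        rw [hA, hB]
        exact ih dw (le_trans hdwlen hrest)

-- ===== VERDICT (by name: the statement is the Claim_ definition above) =====
theorem ticket_checker_spec : Claim_equal_ticket_checker := by
  intro t s _
  unfold Spec_ticket_checker ticket_checker ticket_checker_alt
  exact main_aux s t.toList.length t.toList le_rfl
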